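-- pv_equiv track=rewrite | github.com/subh-karma/LeetCode- | LC13Apr26.py | getMinDistance
-- ===== SOURCE A (Python) =====
-- def getMinDistance(nums: list[int], target: int, start: int) -> int:
--
--     if nums[start] == target:
--         return 0
--
--     n = len(nums)
--     d = 1
--
--     while True:
--         if start - d >= 0 and nums[start - d] == target:
--             return d
--
--         if start + d < n and nums[start + d] == target:
--             return d
--
--         d += 1
-- ===== SOURCE B (Python) =====
-- def getMinDistance(nums: list[int], target: int, start: int) -> int:
--     return min(abs(i - start) for i, v in enumerate(nums) if v == target)
-- ===== Notes on version B (the rewrite author's own statement) =====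
-- stated objective: simpler
-- what changed: Replaces the expanding two-sided probe loop (check start-d and start+d for d=1,2,...) by a single enumerate min-scan keeping a running minimum of |i-start| over matching indices.
-- outside the precondition, e.g. on getMinDistance([1, 2], 2, -2): A returns 1, B returns 3
import Mathlib
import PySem

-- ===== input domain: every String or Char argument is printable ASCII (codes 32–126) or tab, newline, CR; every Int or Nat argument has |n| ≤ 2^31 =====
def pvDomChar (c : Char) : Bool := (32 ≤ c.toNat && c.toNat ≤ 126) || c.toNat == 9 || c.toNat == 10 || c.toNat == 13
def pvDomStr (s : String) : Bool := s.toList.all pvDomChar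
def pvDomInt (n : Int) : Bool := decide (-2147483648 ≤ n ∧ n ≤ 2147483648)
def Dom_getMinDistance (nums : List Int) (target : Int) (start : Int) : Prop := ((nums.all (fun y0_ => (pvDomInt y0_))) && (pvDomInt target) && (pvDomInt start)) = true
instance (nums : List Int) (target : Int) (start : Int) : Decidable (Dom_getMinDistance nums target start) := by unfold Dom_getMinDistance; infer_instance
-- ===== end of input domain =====

-- B replaces A's expanding two-sided probe (d = 1, 2, … testing start-d and start+d) by a
-- single min-scan over enumerate(nums); objective: simpler. Equality is proved on the task's
-- natural domain (0 ≤ start < len(nums), target present).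

-- ===== PORT A =====
-- A's 'while True' loop, with fuel: under Pre_ the answer d is at most len(nums) - 1,
-- so fuel = len(nums) is enough; the 0-fuel branch is unreachable under Pre_.
def gmdLoop (nums : List Int) (target : Int) (start : Int) (n : Int) (d : Int) : Nat → Int
  | 0 => 0
  | fuel + 1 =>
    if 0 ≤ start - d ∧ PySem.List.pyGet? nums (start - d) = some target then d
    else if start + d < n ∧ PySem.List.pyGet? nums (start + d) = some target then d
    else gmdLoop nums target start n (d + 1) fuel

def getMinDistance (nums : List Int) (target : Int) (start : Int) : Int :=
  if PySem.List.pyGet? nums start = some target then 0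
  else gmdLoop nums target start (nums.length : Int) 1 nums.length

-- ===== PORT B =====
-- min(abs(i - start) for i, v in enumerate(nums) if v == target)
def getMinDistance_alt (nums : List Int) (target : Int) (start : Int) : Int :=
  match PySem.List.min?
      (((PySem.List.enumerate nums 0).filter (fun p => p.2 == target)).map
        (fun p => |p.1 - start|)) (fun x => x) with
  | some m => m
  | none => 0   -- Python's min raises ValueError on an empty generator; unreachable under Pre_

-- ===== PRECONDITION & SPEC =====
-- Pre_ is the problem's natural domain: a valid non-negative index start and target present.
-- Outside it A raises IndexError (start not in [-len, len)), loops forever (target absent),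
-- or answers through Python's negative-index wraparound (-len ≤ start < 0), which is outside
-- the task's domain (cited example: ([1, 2], 2, -2) → A returns 1, B returns 3).
def Pre_getMinDistance (nums : List Int) (target : Int) (start : Int) : Prop :=
  0 ≤ start ∧ start < (nums.length : Int) ∧ target ∈ nums
instance (nums : List Int) (target : Int) (start : Int) : Decidable (Pre_getMinDistance nums target start) := by unfold Pre_getMinDistance; infer_instance
def pvWitness_getMinDistance : List Int × Int × Int := ([1, 2, 3], 2, 0)

def Spec_getMinDistance (nums : List Int) (target : Int) (start : Int) (out : Int) : Prop := out = getMinDistance_alt nums target start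
instance (nums : List Int) (target : Int) (start : Int) (out : Int) : Decidable (Spec_getMinDistance nums target start out) := by unfold Spec_getMinDistance; infer_instance

-- ===== CLAIM (what is proved, stated in full; the proofs are below) =====
def Claim_equal_getMinDistance : Prop := ∀ (nums : List Int) (target : Int) (start : Int), Dom_getMinDistance nums target start → Pre_getMinDistance nums target start → Spec_getMinDistance nums target start (getMinDistance nums target start)

-- ===== LEMMAS AND PROOFS =====

-- membership in the list B minimises over
lemma mem_gmdL_iff (nums : List Int) (target start x : Int) :
    x ∈ (((PySem.List.enumerate nums 0).filter (fun p => p.2 == target)).map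
          (fun p => |p.1 - start|)) ↔
    ∃ (k : Nat) (hk : k < nums.length), nums[k] = target ∧ x = |(k : Int) - start| := by
  simp only [List.mem_map, List.mem_filter, PySem.List.mem_enumerate_iff, beq_iff_eq]
  constructor
  · rintro ⟨p, ⟨⟨k, hk, rfl⟩, ht⟩, rfl⟩
    exact ⟨k, hk, ht, by simp⟩
  · rintro ⟨k, hk, ht, rfl⟩
    exact ⟨((k : Int), nums[k]), ⟨⟨k, hk, by simp⟩, ht⟩, rfl⟩

-- B's value is the minimum distance: it is attained and it is a lower bound
lemma alt_char (nums : List Int) (target start : Int) (h : target ∈ nums) :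
    (∃ (k : Nat) (hk : k < nums.length), nums[k] = target ∧
        |(k : Int) - start| = getMinDistance_alt nums target start) ∧
    (∀ (k : Nat) (hk : k < nums.length), nums[k] = target →
        getMinDistance_alt nums target start ≤ |(k : Int) - start|) := by
  obtain ⟨k0, hk0, ht0⟩ := List.mem_iff_getElem.mp h
  set L := (((PySem.List.enumerate nums 0).filter (fun p => p.2 == target)).map
      (fun p => |p.1 - start|)) with hLdef
  have hne : L ≠ [] := by
    intro hnil
    have : |(k0 : Int) - start| ∈ L := (mem_gmdL_iff nums target start _).mpr ⟨k0, hk0, ht0, rfl⟩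
    simp [hnil] at this
  obtain ⟨m, hm⟩ : ∃ m, PySem.List.min? L (fun x => x) = some m := by
    cases hmin : PySem.List.min? L (fun x => x) with
    | none => exact absurd ((PySem.List.min?_eq_none_iff L (fun x => x)).mp hmin) hne
    | some m => exact ⟨m, rfl⟩
  have halt : getMinDistance_alt nums target start = m := by
    unfold getMinDistance_alt
    rw [← hLdef, hm]
  have hmem := PySem.List.min?_mem hm
  have hlow := PySem.List.min?_isMin hm
  constructor
  · obtain ⟨k, hk, ht, hx⟩ := (mem_gmdL_iff nums target start m).mp hmem
    exact ⟨k, hk, ht, by rw [halt, hx]⟩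
  · intro k hk ht
    rw [halt]
    exact hlow _ ((mem_gmdL_iff nums target start _).mpr ⟨k, hk, ht, rfl⟩)

-- the probe loop returns the minimum distance m once started at any d ≤ m with enough fuel
lemma gmdLoop_eq (nums : List Int) (target start m : Int)
    (hs0 : 0 ≤ start) (hsn : start < (nums.length : Int))
    (hex : ∃ (k : Nat) (hk : k < nums.length), nums[k] = target ∧ |(k : Int) - start| = m)
    (hmin : ∀ (k : Nat) (hk : k < nums.length), nums[k] = target → m ≤ |(k : Int) - start|) :
    ∀ (fuel : Nat) (d : Int), 1 ≤ d → d ≤ m → m - d < (fuel : Int) →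
      gmdLoop nums target start (nums.length : Int) d fuel = m := by
  intro fuel
  induction fuel with
  | zero => intro d _ hdm hf; omega
  | succ fuel ih =>
    intro d hd1 hdm hf
    have hguard : ∀ (i : Int), 0 ≤ i → i < (nums.length : Int) →
        PySem.List.pyGet? nums i = some target → m ≤ |i - start| := by
      intro i h0 hlt hget
      have hi : i.toNat < nums.length := by omega
      rw [PySem.List.pyGet?_eq_some_getElem nums h0 hlt] at hget
      have hcast : ((i.toNat : Int)) = i := Int.toNat_of_nonneg h0
      have := hmin i.toNat hi (by injection hget)
      rwa [hcast] at this
    unfold gmdLoop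
    by_cases hg1 : 0 ≤ start - d ∧ PySem.List.pyGet? nums (start - d) = some target
    · rw [if_pos hg1]
      have := hguard (start - d) hg1.1 (by omega) hg1.2
      have : m ≤ d := by
        have habs : |start - d - start| = d := by rw [abs_sub_comm]; simp [abs_of_nonneg (by omega : (0:Int) ≤ d)]
        omega
      omega
    · rw [if_neg hg1]
      by_cases hg2 : start + d < (nums.length : Int) ∧ PySem.List.pyGet? nums (start + d) = some target
      · rw [if_pos hg2]
        have := hguard (start + d) (by omega) hg2.1 hg2.2
        have : m ≤ d := by
          have habs : |start + d - start| = d := by simp [abs_of_nonneg (by omega : (0:Int) ≤ d)]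
          omega
        omega
      · rw [if_neg hg2]
        have hdm' : d ≠ m := by
          intro rfl_dm
          obtain ⟨k, hk, ht, hdist⟩ := hex
          have hcast : (0:Int) ≤ (k:Int) := Int.natCast_nonneg k
          have hklt : (k : Int) < (nums.length : Int) := by exact_mod_cast hk
          have hget : PySem.List.pyGet? nums (k : Int) = some target := by
            rw [PySem.List.pyGet?_eq_some_getElem nums hcast hklt]
            simp [ht]
          have hcase : (k : Int) = start + d ∨ (k : Int) = start - d := by
            rcases abs_cases ((k : Int) - start) with ⟨h1, _⟩ | ⟨h1, _⟩ <;> omega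
          rcases hcase with hcase | hcase
          · exact hg2 ⟨by omega, by rw [show start + d = (k:Int) by omega]; exact hget⟩
          · exact hg1 ⟨by omega, by rw [show start - d = (k:Int) by omega]; exact hget⟩
        exact ih (d + 1) (by omega) (by omega) (by omega)

theorem gmd_main (nums : List Int) (target start : Int)
    (hpre : Pre_getMinDistance nums target start) :
    getMinDistance nums target start = getMinDistance_alt nums target start := by
  obtain ⟨hs0, hsn, htin⟩ := hpre
  obtain ⟨⟨k, hk, ht, hdist⟩, hmin⟩ := alt_char nums target start htin
  set m := getMinDistance_alt nums target start with hmdef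
  have hm0 : 0 ≤ m := by rw [← hdist]; exact abs_nonneg _
  unfold getMinDistance
  by_cases h0 : PySem.List.pyGet? nums start = some target
  · rw [if_pos h0]
    have hslt : start.toNat < nums.length := by omega
    rw [PySem.List.pyGet?_eq_some_getElem nums hs0 hsn] at h0
    have hms := hmin start.toNat hslt (by injection h0)
    have : ((start.toNat : Int)) = start := Int.toNat_of_nonneg hs0
    rw [this] at hms
    simp at hms
    omega
  · rw [if_neg h0]
    have hm1 : 1 ≤ m := by
      rcases lt_or_eq_of_le hm0 with h | h
      · omega
      · exfalso
        have hks : (k : Int) = start := by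
          have : |(k : Int) - start| = 0 := by omega
          have := abs_eq_zero.mp this; omega
        apply h0
        rw [← hks, PySem.List.pyGet?_eq_some_getElem nums (Int.natCast_nonneg k) (by exact_mod_cast hk)]
        simp [ht]
    have hmub : m - 1 < (nums.length : Int) := by
      have hklt : (k : Int) < (nums.length : Int) := by exact_mod_cast hk
      have : |(k : Int) - start| < (nums.length : Int) := by
        rcases abs_sub_le_iff.mp (le_refl |(k : Int) - start|) with _
        have := Int.natCast_nonneg k
        rw [abs_sub_lt_iff]; omega
      omega
    exact gmdLoop_eq nums target start m hs0 hsn ⟨k, hk, ht, hdist⟩ hmin nums.length 1 le_rfl hm1 hmub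

-- ===== VERDICT (by name: the statement is the Claim_ definition above) =====
theorem getMinDistance_spec : Claim_equal_getMinDistance := by
  intro nums target start _ hpre
  unfold Spec_getMinDistance
  exact gmd_main nums target start hpre
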